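-- pv_equiv track=rewrite | github.com/swami086/Zovark_swami | worker/tools/runner.py | _topological_batches
-- ===== SOURCE A (Python) =====
-- def _topological_batches(deps: dict[int, set[int]]) -> list[list[int]]:
--     """Convert DAG into ordered batches of parallelizable steps."""
--     remaining = set(deps.keys())
--     completed = set()
--     batches = []
--
--     while remaining:
--         ready = {s for s in remaining if deps[s].issubset(completed)}
--         if not ready:
--             # Circular dep safety net — fall back to sequential for remaining
--             batches.append(sorted(remaining))
--             break
--         batches.append(sorted(ready))
--         completed.update(ready)
--         remaining -= ready
--
--     return batches
-- ===== SOURCE B (Python) =====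
-- def _topological_batches(deps: dict[int, set[int]]) -> list[list[int]]:
--     """Convert DAG into ordered batches of parallelizable steps.
--
--     Kahn-style level BFS: build indegree counters and successor lists once,
--     then propagate readiness along edges from each emitted frontier instead
--     of re-scanning remaining nodes' dependency sets every round.
--     """
--     indeg = {s: 0 for s in deps}
--     succ = {s: [] for s in deps}
--     for s, ds in deps.items():
--         for d in ds:
--             indeg[s] += 1
--             if d in deps:
--                 succ[d].append(s)
--     batches = []
--     frontier = sorted(s for s in deps if indeg[s] == 0)
--     emitted = 0
--     while frontier:
--         batches.append(frontier)
--         emitted += len(frontier)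
--         nxt = []
--         for u in frontier:
--             for v in succ[u]:
--                 indeg[v] -= 1
--                 if indeg[v] == 0:
--                     nxt.append(v)
--         frontier = sorted(nxt)
--     if emitted < len(deps):
--         # Circular dep safety net — fall back to sequential for remaining
--         batches.append(sorted(s for s in deps if indeg[s] > 0))
--     return batches
-- ===== Notes on version B (the rewrite author's own statement) =====
-- stated objective: alternative
-- what changed: B replaces A's per-round rescan of every remaining node's dependency set by a Kahn-style level BFS: it builds indegree counters and successor adjacency lists once, then each emitted frontier decrements only its successors' counters, collecting nodes that reach indegree zero as the next frontier.
import Mathlib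
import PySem

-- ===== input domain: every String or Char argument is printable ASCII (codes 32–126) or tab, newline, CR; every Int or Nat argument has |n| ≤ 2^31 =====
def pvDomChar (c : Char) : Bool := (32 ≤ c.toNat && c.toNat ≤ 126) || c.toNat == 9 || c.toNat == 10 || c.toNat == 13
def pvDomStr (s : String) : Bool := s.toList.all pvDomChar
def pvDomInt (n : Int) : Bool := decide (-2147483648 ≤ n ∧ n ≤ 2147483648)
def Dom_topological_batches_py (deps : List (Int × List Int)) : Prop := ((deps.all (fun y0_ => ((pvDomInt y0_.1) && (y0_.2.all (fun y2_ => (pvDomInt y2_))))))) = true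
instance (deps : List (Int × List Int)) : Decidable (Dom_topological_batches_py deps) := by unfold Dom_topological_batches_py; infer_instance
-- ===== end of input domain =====

-- B replaces A's per-round rescan of all remaining dependency sets by a Kahn-style level
-- BFS over indegree counters and successor lists built once (objective: alternative).

-- ===== PORT A =====
-- while-loop of A; fuel = |remaining| + 1 bounds the iterations (each pass removes
-- at least one node from remaining, or breaks)
def pyA_loop (deps : PySem.Dict Int (List Int)) :
    Nat → PySem.Set Int → PySem.Set Int → List (List Int) → List (List Int)
  | 0, _, _, batches => batches
  | fuel + 1, remaining, completed, batches =>
    if remaining.isEmpty then batches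
    else
      -- ready = {s for s in remaining if deps[s].issubset(completed)}
      let ready : PySem.Set Int :=
        remaining.filter (fun s => PySem.Set.issubset (deps.getD s []) completed)
      if ready.isEmpty then
        batches ++ [PySem.List.sorted remaining (fun x => x) false]
      else
        pyA_loop deps fuel (PySem.Set.diff remaining ready)
          (PySem.Set.update completed ready)
          (batches ++ [PySem.List.sorted ready (fun x => x) false])

def topological_batches_py (deps : List (Int × List Int)) : List (List Int) :=
  let d : PySem.Dict Int (List Int) := PySem.Dict.mk deps
  pyA_loop d ((PySem.Set.ofList d.keys).length + 1) (PySem.Set.ofList d.keys) PySem.Set.empty []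

-- ===== PORT B =====
-- build phase: indeg = {s: 0 …}; succ = {s: [] …}; for s, ds in deps.items():
--   for d in ds: indeg[s] += 1; if d in deps: succ[d].append(s)
-- (ds is a Python set — iterate its distinct elements, PySem.Set.ofList)
def pyB_build (d : PySem.Dict Int (List Int)) :
    PySem.Dict Int Int × PySem.Dict Int (List Int) :=
  d.items.foldl (fun st p =>
      (PySem.Set.ofList p.2).foldl (fun st2 e =>
        (st2.1.modify p.1 0 (· + 1),
         if d.contains e then st2.2.modify e [] (· ++ [p.1]) else st2.2)) st)
    (d.keys.foldl (fun m k => m.insert k (0 : Int)) PySem.Dict.empty,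
     d.keys.foldl (fun m k => m.insert k ([] : List Int)) PySem.Dict.empty)

-- one round: for u in frontier: for v in succ[u]: indeg[v] -= 1; if indeg[v]==0: nxt.append(v)
def pyB_round (succ : PySem.Dict Int (List Int)) (frontier : List Int)
    (ind : PySem.Dict Int Int) : PySem.Dict Int Int × List Int :=
  frontier.foldl (fun st u =>
      (succ.getD u []).foldl (fun st2 v =>
        let i2 := st2.1.modify v 0 (· - 1)
        if i2.getD v 0 == 0 then (i2, st2.2 ++ [v]) else (i2, st2.2)) st)
    (ind, [])

-- while-loop of B; fuel = |keys| + 1 bounds the iterations (each pass emits ≥ 1 node)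
def pyB_loop (succ : PySem.Dict Int (List Int)) :
    Nat → PySem.Dict Int Int → List Int → Int → List (List Int) →
    PySem.Dict Int Int × Int × List (List Int)
  | 0, ind, _, em, bs => (ind, em, bs)
  | fuel + 1, ind, frontier, em, bs =>
    if frontier.isEmpty then (ind, em, bs)
    else
      let st := pyB_round succ frontier ind
      pyB_loop succ fuel st.1 (PySem.List.sorted st.2 (fun x => x) false)
        (em + (frontier.length : Int)) (bs ++ [frontier])

def topological_batches_py_alt (deps : List (Int × List Int)) : List (List Int) :=
  let d : PySem.Dict Int (List Int) := PySem.Dict.mk deps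
  let bd := pyB_build d
  let frontier := PySem.List.sorted
    (d.keys.filter (fun s => bd.1.getD s 0 == 0)) (fun x => x) false
  let res := pyB_loop bd.2 (d.keys.length + 1) bd.1 frontier 0 []
  if res.2.1 < (d.keys.length : Int) then
    res.2.2 ++ [PySem.List.sorted
      (d.keys.filter (fun s => decide (0 < res.1.getD s 0))) (fun x => x) false]
  else res.2.2

-- ===== PRECONDITION & SPEC =====
-- Pre_ excludes association lists with duplicate keys: they do not represent any
-- Python dict (A's parameter is a dict, whose keys are necessarily distinct).
def Pre_topological_batches_py (deps : List (Int × List Int)) : Prop :=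
  (deps.map Prod.fst).Nodup
instance (deps : List (Int × List Int)) : Decidable (Pre_topological_batches_py deps) := by
  unfold Pre_topological_batches_py; infer_instance

def pvWitness_topological_batches_py : (List (Int × List Int)) :=
  [(1, []), (2, [1]), (3, [1, 2]), (4, [9])]

def Spec_topological_batches_py (deps : List (Int × List Int)) (out : List (List Int)) : Prop := out = topological_batches_py_alt deps
instance (deps : List (Int × List Int)) (out : List (List Int)) : Decidable (Spec_topological_batches_py deps out) := by unfold Spec_topological_batches_py; infer_instance

-- ===== CLAIM (what is proved, stated in full; the proofs are below) =====
def Claim_equal_topological_batches_py : Prop := ∀ (deps : List (Int × List Int)), Dom_topological_batches_py deps → Pre_topological_batches_py deps → Spec_topological_batches_py deps (topological_batches_py deps)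

-- ===== LEMMAS AND PROOFS =====

-- proof-only abbreviations
def pvD (deps : List (Int × List Int)) : PySem.Dict Int (List Int) := PySem.Dict.mk deps
def pvK (deps : List (Int × List Int)) : List Int := (pvD deps).keys
def pvDD (deps : List (Int × List Int)) (v : Int) : List Int :=
  PySem.Set.ofList ((pvD deps).getD v [])
def pvResid (deps : List (Int × List Int)) (C : PySem.Set Int) (v : Int) : Int :=
  (((pvDD deps v).filter (fun x => !(PySem.Set.contains C x))).length : Int)
def pvRem (deps : List (Int × List Int)) (C : PySem.Set Int) : List Int :=
  (pvK deps).filter (fun s => !(PySem.Set.contains C s))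
def pvReady (deps : List (Int × List Int)) (C : PySem.Set Int) : List Int :=
  (pvRem deps C).filter (fun s => PySem.Set.issubset ((pvD deps).getD s []) C)

-- base dicts: a fold of constant inserts looks up to the constant
lemma pv_getD_insert_const {ν : Type} (c : ν) (L : List Int) (m : PySem.Dict Int ν)
    (h : ∀ u, m.getD u c = c) (v : Int) :
    (L.foldl (fun m k => m.insert k c) m).getD v c = c := by
  induction L generalizing m with
  | nil => exact h v
  | cons k tl ih =>
    simp only [List.foldl_cons]
    refine ih _ (fun u => ?_) 
    rw [PySem.Dict.getD_insert]
    split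
    · rfl
    · exact h u

-- |L| modifies (+1) at a fixed key
lemma pv_getD_modify_rep (L : List Int) (s : Int) (i : PySem.Dict Int Int) (v : Int) :
    (L.foldl (fun i2 (_ : Int) => i2.modify s 0 (· + 1)) i).getD v 0
      = i.getD v 0 + if v = s then (L.length : Int) else 0 := by
  induction L generalizing i with
  | nil => simp
  | cons e tl ih =>
    simp only [List.foldl_cons, ih, PySem.Dict.getD_modify, List.length_cons]
    by_cases h : v = s <;> simp [h] <;> push_cast <;> omega

-- with distinct keys, filtering the items at one key is a singleton
lemma pv_filter_key (l : List (Int × List Int)) (hnd : (l.map Prod.fst).Nodup)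
    (v : Int) (w : List Int) (hm : (v, w) ∈ l) :
    l.filter (fun p => p.1 == v) = [(v, w)] := by
  induction l with
  | nil => cases hm
  | cons p tl ih =>
    simp only [List.map_cons, List.nodup_cons] at hnd
    rcases List.mem_cons.mp hm with h | h
    · subst h
      simp only [List.filter_cons, beq_self_eq_true, if_pos trivial]
      have : tl.filter (fun p => p.1 == v) = [] := by
        apply List.filter_eq_nil_iff.mpr
        intro q hq hbe
        exact hnd.1 (List.mem_map.mpr ⟨q, hq, by simpa using hbe⟩)
      simp [this]
    · have hne : (p.1 == v) = false := by
        apply beq_eq_false_iff_ne.mpr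
        intro he
        exact hnd.1 (List.mem_map.mpr ⟨(v, w), h, by simpa using he.symm⟩)
      simp only [List.filter_cons, hne]
      exact ih hnd.2 h

-- the indegree-building double loop, lookup at v
lemma pv_indeg_items (l : List (Int × List Int)) (i : PySem.Dict Int Int) (v : Int) :
    (l.foldl (fun i p => (PySem.Set.ofList p.2).foldl
        (fun i2 (_ : Int) => i2.modify p.1 0 (· + 1)) i) i).getD v 0
      = i.getD v 0
        + ((l.filter (fun p => p.1 == v)).map
            (fun p => ((PySem.Set.ofList p.2).length : Int))).sum := by
  induction l generalizing i with
  | nil => simp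
  | cons p tl ih =>
    simp only [List.foldl_cons, ih, pv_getD_modify_rep, List.filter_cons]
    by_cases h : p.1 = v
    · simp [h, beq_iff_eq]
      omega
    · have : (p.1 == v) = false := beq_eq_false_iff_ne.mpr h
      simp [this, Ne.symm h]

-- the successor-building inner loop (over one distinct dependency set)
lemma pv_succ_inner (d : PySem.Dict Int (List Int)) (L : List Int) (hL : L.Nodup) (s : Int)
    (sc : PySem.Dict Int (List Int)) (u : Int) :
    (L.foldl (fun s2 e => if d.contains e then s2.modify e [] (· ++ [s]) else s2) sc).getD u []
      = sc.getD u [] ++ (if u ∈ L ∧ d.contains u = true then [s] else []) := by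
  induction L generalizing sc with
  | nil => simp
  | cons e tl ih =>
    simp only [List.nodup_cons] at hL
    by_cases hc : d.contains e = true
    · simp only [List.foldl_cons, hc, if_true, ih hL.2, PySem.Dict.getD_modify]
      by_cases hue : u = e
      · subst hue
        simp [hL.1, hc]
      · have h2 : (u ∈ e :: tl ∧ d.contains u = true) ↔ (u ∈ tl ∧ d.contains u = true) := by
          simp [List.mem_cons, hue]
        rw [if_neg hue]
        by_cases hut : u ∈ tl ∧ d.contains u = true
        · rw [if_pos hut, if_pos (h2.mpr hut)]
        · rw [if_neg hut, if_neg (fun h => hut (h2.mp h))]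
    · have hcf : d.contains e = false := by simpa using hc
      simp only [List.foldl_cons, hcf, Bool.false_eq_true, if_false, ih hL.2]
      by_cases hue : u = e
      · subst hue
        simp [hcf]
      · simp [List.mem_cons, hue]

-- the successor-building outer loop, lookup at u
lemma pv_succ_items (d : PySem.Dict Int (List Int)) (l : List (Int × List Int))
    (sc : PySem.Dict Int (List Int)) (u : Int) :
    (l.foldl (fun sc p => (PySem.Set.ofList p.2).foldl
        (fun s2 e => if d.contains e then s2.modify e [] (· ++ [p.1]) else s2) sc) sc).getD u []
      = sc.getD u []
        ++ (l.filter (fun p => d.contains u && (PySem.Set.ofList p.2).contains u)).map Prod.fst := by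
  induction l generalizing sc with
  | nil => simp
  | cons p tl ih =>
    simp only [List.foldl_cons, ih, List.filter_cons]
    rw [pv_succ_inner d _ (PySem.Set.nodup_ofList p.2)]
    by_cases hcond : u ∈ PySem.Set.ofList p.2 ∧ d.contains u = true
    · have hb : (d.contains u && (PySem.Set.ofList p.2).contains u) = true := by
        rw [hcond.2, Bool.true_and]
        exact (PySem.Set.contains_iff _ _).mpr hcond.1
      rw [if_pos hcond, hb]
      simp [List.append_assoc]
    · have hb : (d.contains u && (PySem.Set.ofList p.2).contains u) = false := by
        cases hdu : d.contains u with
        | false => simp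
        | true =>
          simp only [Bool.true_and]
          cases hcu : (PySem.Set.ofList p.2).contains u with
          | false => rfl
          | true => exact absurd ⟨(PySem.Set.contains_iff _ _).mp hcu, hdu⟩ hcond
      rw [if_neg hcond, hb]
      simp

-- the indegree-building double loop, lookup at v

-- pyB_build splits into two independent folds
lemma pv_build_eq (d : PySem.Dict Int (List Int)) :
    pyB_build d =
      (d.items.foldl (fun i p => (PySem.Set.ofList p.2).foldl
          (fun i2 (_ : Int) => i2.modify p.1 0 (· + 1)) i)
         (d.keys.foldl (fun m k => m.insert k (0 : Int)) PySem.Dict.empty),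
       d.items.foldl (fun sc p => (PySem.Set.ofList p.2).foldl
          (fun s2 e => if d.contains e then s2.modify e [] (· ++ [p.1]) else s2) sc)
         (d.keys.foldl (fun m k => m.insert k ([] : List Int)) PySem.Dict.empty)) := by
  unfold pyB_build
  have hstep : (fun (st : PySem.Dict Int Int × PySem.Dict Int (List Int)) (p : Int × List Int) =>
        (PySem.Set.ofList p.2).foldl (fun st2 e =>
          (st2.1.modify p.1 0 (· + 1),
           if d.contains e then st2.2.modify e [] (· ++ [p.1]) else st2.2)) st)
      = fun st p =>
        ((PySem.Set.ofList p.2).foldl (fun i2 (_ : Int) => i2.modify p.1 0 (· + 1)) st.1,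
         (PySem.Set.ofList p.2).foldl
           (fun s2 e => if d.contains e then s2.modify e [] (· ++ [p.1]) else s2) st.2) := by
    funext st p
    have h := PySem.List.foldl_prod_mk
      (f := fun i2 (_ : Int) => i2.modify p.1 0 (· + 1))
      (g := fun s2 e => if d.contains e then s2.modify e [] (· ++ [p.1]) else s2)
      (PySem.Set.ofList p.2) st.1 st.2
    simpa using h
  rw [hstep]
  exact PySem.List.foldl_prod_mk
    (f := fun (i : PySem.Dict Int Int) (p : Int × List Int) => (PySem.Set.ofList p.2).foldl
      (fun i2 (_ : Int) => i2.modify p.1 0 (· + 1)) i)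
    (g := fun (sc : PySem.Dict Int (List Int)) (p : Int × List Int) => (PySem.Set.ofList p.2).foldl
      (fun s2 e => if d.contains e then s2.modify e [] (· ++ [p.1]) else s2) sc)
    _ _ _

-- the built indegree of a key v is the size of its distinct dependency set
lemma pv_indeg_build (deps : List (Int × List Int)) (hnd : (pvK deps).Nodup)
    (v : Int) (hv : v ∈ pvK deps) :
    (pyB_build (pvD deps)).1.getD v 0 = ((pvDD deps v).length : Int) := by
  rcases List.mem_map.mp hv with ⟨p, hp, hpv⟩
  have hitem : (v, p.2) ∈ (pvD deps).items := by
    have hh : p = (v, p.2) := by rw [← hpv]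
    rw [← hh]; exact hp
  have hget : (pvD deps).getD v [] = p.2 :=
    PySem.Dict.getD_of_mem_items _ hitem hnd []
  rw [pv_build_eq]
  simp only
  rw [pv_indeg_items, pv_getD_insert_const (0 : Int) _ _ (fun u => by simp),
      pv_filter_key _ hnd v p.2 hitem]
  simp [pvDD, hget]

-- the built successor list of u: all keys whose dependency set holds u, in key order
lemma pv_succ_build (deps : List (Int × List Int)) (u : Int) :
    (pyB_build (pvD deps)).2.getD u []
      = (((pvD deps).items.filter (fun p =>
            (pvD deps).contains u && (PySem.Set.ofList p.2).contains u)).map Prod.fst) := by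
  rw [pv_build_eq]
  simp only
  rw [pv_succ_items, pv_getD_insert_const ([] : List Int) _ _ (fun u => by simp)]
  simp

lemma pv_mem_succ_K (deps : List (Int × List Int)) (u v : Int)
    (h : v ∈ (pyB_build (pvD deps)).2.getD u []) : v ∈ pvK deps := by
  rw [pv_succ_build] at h
  rcases List.mem_map.mp h with ⟨p, hp, hpv⟩
  exact hpv ▸ List.mem_map.mpr ⟨p, (List.mem_filter.mp hp).1, rfl⟩

lemma pv_count_map_fst (m : List (Int × List Int)) (v : Int) :
    (m.map Prod.fst).count v = (m.filter (fun p => p.1 == v)).length := by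
  induction m with
  | nil => rfl
  | cons p tl ih =>
    simp only [List.map_cons, List.count_cons, ih, List.filter_cons]
    by_cases h : p.1 = v
    · simp [h]
    · have hb : (p.1 == v) = false := beq_eq_false_iff_ne.mpr h
      simp [hb]

-- count of v in the built successor list of u
lemma pv_count_succ (deps : List (Int × List Int)) (hnd : (pvK deps).Nodup)
    (u v : Int) (hv : v ∈ pvK deps) :
    ((pyB_build (pvD deps)).2.getD u []).count v
      = if (pvD deps).contains u = true ∧ u ∈ pvDD deps v then 1 else 0 := by
  rcases List.mem_map.mp hv with ⟨p, hp, hpv⟩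
  have hitem : (v, p.2) ∈ (pvD deps).items := by
    have hh : p = (v, p.2) := by rw [← hpv]
    rw [← hh]; exact hp
  have hget : (pvD deps).getD v [] = p.2 :=
    PySem.Dict.getD_of_mem_items _ hitem hnd []
  have hdd : pvDD deps v = PySem.Set.ofList p.2 := by unfold pvDD; rw [hget]
  rw [pv_succ_build, pv_count_map_fst, List.filter_filter]
  have hcomm : (fun p : Int × List Int =>
        ((p.1 == v) && ((pvD deps).contains u && (PySem.Set.ofList p.2).contains u)))
      = fun p => (((pvD deps).contains u && (PySem.Set.ofList p.2).contains u) && (p.1 == v)) := by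
    funext q; exact Bool.and_comm _ _
  rw [hcomm, ← List.filter_filter, pv_filter_key _ hnd v p.2 hitem]
  have hmem : u ∈ p.2 ↔ u ∈ pvDD deps v := by
    rw [hdd]; exact (PySem.Set.mem_ofList p.2 u).symm
  by_cases h1 : (pvD deps).contains u = true
  · by_cases h2 : u ∈ pvDD deps v
    · simp [h1, h2, hmem.mpr h2]
    · have hnp : u ∉ p.2 := fun h => h2 (hmem.mp h)
      simp [h1, h2, hnp]
  · have h1f : (pvD deps).contains u = false := by simpa using h1
    simp [h1f, h1]

-- single-edge decrement step of pyB_round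
def pvStep (st : PySem.Dict Int Int × List Int) (v : Int) : PySem.Dict Int Int × List Int :=
  let i2 := st.1.modify v 0 (· - 1)
  if i2.getD v 0 == 0 then (i2, st.2 ++ [v]) else (i2, st.2)

lemma pv_round_eq (succ : PySem.Dict Int (List Int)) (F : List Int) (ind : PySem.Dict Int Int) :
    pyB_round succ F ind = (F.flatMap (fun u => succ.getD u [])).foldl pvStep (ind, []) := by
  unfold pyB_round pvStep
  rw [List.foldl_flatMap]

lemma pv_step_eval (ind : PySem.Dict Int Int) (acc : List Int) (u : Int) :
    pvStep (ind, acc) u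
      = (ind.modify u 0 (· - 1), if ind.getD u 0 - 1 = 0 then acc ++ [u] else acc) := by
  by_cases h : ind.getD u 0 - 1 = 0
  · simp [pvStep, PySem.Dict.getD_modify_self, h]
  · simp [pvStep, PySem.Dict.getD_modify_self, h]

lemma pv_round_fst (L : List Int) : ∀ (ind : PySem.Dict Int Int) (acc : List Int) (v : Int),
    (L.foldl pvStep (ind, acc)).1.getD v 0 = ind.getD v 0 - (L.count v : Int) := by
  induction L with
  | nil => intro ind acc v; simp
  | cons u tl ih =>
    intro ind acc v
    simp only [List.foldl_cons, pv_step_eval]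
    rw [ih, PySem.Dict.getD_modify, List.count_cons]
    by_cases h : v = u
    · subst h
      simp only [if_pos rfl, beq_self_eq_true, if_true]
      push_cast
      omega
    · have hbu : (u == v) = false := beq_eq_false_iff_ne.mpr (fun he => h he.symm)
      simp only [if_neg h, hbu, Bool.false_eq_true, if_false, Nat.add_zero]

lemma pv_round_mem (L : List Int) : ∀ (ind : PySem.Dict Int Int) (acc : List Int) (v : Int),
    v ∈ (L.foldl pvStep (ind, acc)).2
      ↔ v ∈ acc ∨ (0 < ind.getD v 0 ∧ ind.getD v 0 ≤ (L.count v : Int)) := by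
  induction L with
  | nil =>
    intro ind acc v
    simp only [List.foldl_nil, List.count_nil, Nat.cast_zero]
    constructor
    · exact Or.inl
    · rintro (h | ⟨h1, h2⟩)
      · exact h
      · omega
  | cons u tl ih =>
    intro ind acc v
    simp only [List.foldl_cons, pv_step_eval, ih, List.count_cons, PySem.Dict.getD_modify]
    by_cases hvu : v = u
    · subst hvu
      simp only [if_pos rfl, beq_self_eq_true, if_true]
      by_cases h1 : ind.getD v 0 - 1 = 0
      · simp only [if_pos h1, List.mem_append, List.mem_singleton]
        constructor
        · intro _
          right
          refine ⟨by omega, by push_cast; omega⟩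
        · intro _
          simp
      · simp only [if_neg h1]
        constructor
        · rintro (h | ⟨h2, h3⟩)
          · exact Or.inl h
          · right
            push_cast at h3 ⊢
            exact ⟨by omega, by omega⟩
        · rintro (h | ⟨h2, h3⟩)
          · exact Or.inl h
          · right
            push_cast at h3 ⊢
            exact ⟨by omega, by omega⟩
    · have hbu : (u == v) = false := beq_eq_false_iff_ne.mpr (fun he => hvu he.symm)
      by_cases h1 : ind.getD u 0 - 1 = 0
      · simp [hvu, hbu, h1]
      · simp [hvu, hbu, h1]

lemma pv_round_nodup (L : List Int) : ∀ (ind : PySem.Dict Int Int) (acc : List Int),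
    acc.Nodup → (∀ v ∈ acc, ind.getD v 0 ≤ 0) → (L.foldl pvStep (ind, acc)).2.Nodup := by
  induction L with
  | nil => intro ind acc h _; simpa using h
  | cons u tl ih =>
    intro ind acc hnd hle
    simp only [List.foldl_cons, pv_step_eval]
    by_cases h1 : ind.getD u 0 - 1 = 0
    · rw [if_pos h1]
      refine ih _ _ ?_ ?_
      · have hu : u ∉ acc := fun h => by have := hle u h; omega
        simp only [List.nodup_append, List.nodup_singleton, true_and]
        refine ⟨hnd, ?_⟩
        intro a ha b hb
        simp only [List.mem_singleton] at hb
        subst hb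
        exact fun he => hu (he ▸ ha)
      · intro v hv
        rw [PySem.Dict.getD_modify]
        rcases List.mem_append.mp hv with h | h
        · by_cases hvu : v = u
          · subst hvu; rw [if_pos rfl]; omega
          · rw [if_neg hvu]; exact hle v h
        · simp only [List.mem_singleton] at h
          subst h
          rw [if_pos rfl]
          omega
    · rw [if_neg h1]
      refine ih _ _ hnd ?_
      intro v hv
      rw [PySem.Dict.getD_modify]
      by_cases hvu : v = u
      · subst hvu; rw [if_pos rfl]; have := hle v hv; omega
      · rw [if_neg hvu]; exact hle v hv

lemma pv_count_flatMap (g : Int → List Int) (F : List Int) (v : Int) :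
    (F.flatMap g).count v = (F.map (fun u => (g u).count v)).sum := by
  induction F with
  | nil => rfl
  | cons u tl ih => simp [List.flatMap_cons, List.count_append, ih]

lemma pv_sum_ite (F : List Int) (c : Int → Bool) :
    (F.map (fun u => if c u = true then 1 else 0)).sum = (F.filter c).length := by
  induction F with
  | nil => rfl
  | cons u tl ih =>
    by_cases h : c u <;> simp [List.filter_cons, h, ih] <;> omega

-- total decrements a frontier F ⊆ keys applies to the key v
lemma pv_count_round (deps : List (Int × List Int)) (hnd : (pvK deps).Nodup)
    (F : List Int) (hF : ∀ u ∈ F, u ∈ pvK deps) (v : Int) (hv : v ∈ pvK deps) :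
    (F.flatMap (fun u => (pyB_build (pvD deps)).2.getD u [])).count v
      = (F.filter (fun u => decide (u ∈ pvDD deps v))).length := by
  rw [pv_count_flatMap]
  have hmap : F.map (fun u => ((pyB_build (pvD deps)).2.getD u []).count v)
      = F.map (fun u => if (fun u => decide (u ∈ pvDD deps v)) u = true then 1 else 0) := by
    apply List.map_congr_left
    intro u hu
    rw [pv_count_succ deps hnd u v hv]
    have hcu : (pvD deps).contains u = true :=
      (PySem.Dict.contains_iff_mem_keys _ _).mpr (hF u hu)
    by_cases h : u ∈ pvDD deps v
    · simp [h, hcu]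
    · simp [h, hcu]
  rw [hmap, pv_sum_ite]

lemma pv_length_filter_split (l : List Int) (p q : Int → Bool) :
    (l.filter p).length
      = (l.filter (fun x => p x && q x)).length + (l.filter (fun x => p x && !q x)).length := by
  induction l with
  | nil => rfl
  | cons x tl ih =>
    by_cases hp : p x <;> by_cases hq : q x <;>
      simp [List.filter_cons, hp, hq, ih] <;> omega

lemma pv_filter_mem_comm (a b : List Int) (ha : a.Nodup) (hb : b.Nodup) :
    (a.filter (fun x => decide (x ∈ b))).length
      = (b.filter (fun x => decide (x ∈ a))).length := by
  rw [← List.toFinset_card_of_nodup (ha.filter _), ← List.toFinset_card_of_nodup (hb.filter _),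
      List.toFinset_filter, List.toFinset_filter]
  congr 1
  ext x
  simp only [Finset.mem_filter, List.mem_toFinset, decide_eq_true_eq]
  tauto

lemma pv_resid_zero_iff (deps : List (Int × List Int)) (C : PySem.Set Int) (v : Int) :
    pvResid deps C v = 0 ↔ PySem.Set.issubset ((pvD deps).getD v []) C = true := by
  unfold pvResid
  rw [PySem.Set.issubset_iff]
  have hiff : (((pvDD deps v).filter (fun x => !(PySem.Set.contains C x))).length = 0)
      ↔ ∀ x ∈ (pvD deps).getD v [], x ∈ C := by
    rw [List.length_eq_zero_iff, List.filter_eq_nil_iff]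
    constructor
    · intro h x hx
      have hx' : x ∈ pvDD deps v := (PySem.Set.mem_ofList _ _).mpr hx
      have h2 := h x hx'
      simp only [Bool.not_eq_true', Bool.not_eq_false] at h2
      exact (PySem.Set.contains_iff _ _).mp h2
    · intro h x hx
      have hx' : x ∈ (pvD deps).getD v [] := (PySem.Set.mem_ofList _ _).mp hx
      simp only [Bool.not_eq_true', Bool.not_eq_false]
      exact (PySem.Set.contains_iff _ _).mpr (h x hx')
  constructor
  · intro h; exact hiff.mp (by exact_mod_cast h)
  · intro h; exact_mod_cast hiff.mpr h

lemma pv_contains_eq_decide (s : PySem.Set Int) (x : Int) :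
    PySem.Set.contains s x = decide (x ∈ s) := by
  rw [Bool.eq_iff_iff]
  simp [PySem.Set.contains_iff]

lemma pv_contains_update (C : PySem.Set Int) (xs : List Int) (x : Int) :
    PySem.Set.contains (PySem.Set.update C xs) x
      = (PySem.Set.contains C x || decide (x ∈ xs)) := by
  rw [Bool.eq_iff_iff]
  simp [PySem.Set.contains_iff, PySem.Set.mem_update]

lemma pv_issubset_update (L : List Int) (C : PySem.Set Int) (xs : List Int)
    (h : PySem.Set.issubset L C = true) :
    PySem.Set.issubset L (PySem.Set.update C xs) = true := by
  rw [PySem.Set.issubset_iff] at h ⊢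
  intro x hx
  exact (PySem.Set.mem_update _ _ _).mpr (Or.inl (h x hx))

-- the tail of B (fallback batch for unprocessed nodes) as a function of the loop result
def pvFinish (deps : List (Int × List Int))
    (res : PySem.Dict Int Int × Int × List (List Int)) : List (List Int) :=
  if res.2.1 < ((pvK deps).length : Int) then
    res.2.2 ++ [PySem.List.sorted
      ((pvK deps).filter (fun s => decide (0 < res.1.getD s 0))) (fun x => x) false]
  else res.2.2

lemma pv_alt_eq (deps : List (Int × List Int)) :
    topological_batches_py_alt deps
      = pvFinish deps (pyB_loop (pyB_build (pvD deps)).2 ((pvK deps).length + 1)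
          (pyB_build (pvD deps)).1
          (PySem.List.sorted ((pvK deps).filter
            (fun s => (pyB_build (pvD deps)).1.getD s 0 == 0)) (fun x => x) false)
          0 []) := rfl

-- the central lock-step invariant: A's round state (remaining, completed) corresponds to
-- B's (indegree counters, sorted frontier, emitted count); both loops advance together
lemma pv_lockstep (deps : List (Int × List Int)) (hnd : (pvK deps).Nodup) :
    ∀ (fuel : Nat) (C : PySem.Set Int) (ind : PySem.Dict Int Int) (em : Int)
      (bs : List (List Int)),
      (pvRem deps C).length < fuel →
      (∀ v ∈ pvK deps, ind.getD v 0 = pvResid deps C v) →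
      (∀ v ∈ pvK deps, PySem.Set.contains C v = true →
          PySem.Set.issubset ((pvD deps).getD v []) C = true) →
      em = ((pvK deps).length : Int) - ((pvRem deps C).length : Int) →
      pyA_loop (pvD deps) fuel (pvRem deps C) C bs
        = pvFinish deps (pyB_loop (pyB_build (pvD deps)).2 fuel ind
            (PySem.List.sorted (pvReady deps C) (fun x => x) false) em bs) := by
  intro fuel
  induction fuel with
  | zero =>
    intro C ind em bs hfuel hind hclosed hem
    exact absurd hfuel (Nat.not_lt_zero _)
  | succ fuel ih =>
    intro C ind em bs hfuel hind hclosed hem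
    by_cases hrem : pvRem deps C = []
    · -- A's remaining is empty: both loops stop, no fallback batch
      have hready : pvReady deps C = [] := by unfold pvReady; rw [hrem]; rfl
      rw [pyA_loop, pyB_loop]
      have h1 : (pvRem deps C).isEmpty = true := by simp [hrem]
      have h2 : (PySem.List.sorted (pvReady deps C) (fun x => x) false).isEmpty = true := by
        simp [(PySem.List.sorted_eq_nil_iff _ _ _).mpr hready]
      rw [if_pos h1, if_pos h2]
      simp only [hrem, List.length_nil, Nat.cast_zero, sub_zero] at hem
      simp [pvFinish, hem]
    · by_cases hrd : pvReady deps C = []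
      · -- no node is ready: A emits the cycle fallback, B's loop stops and pvFinish emits it
        rw [pyA_loop, pyB_loop]
        have h1 : (pvRem deps C).isEmpty = false := by simp [hrem]
        have h2 : (PySem.List.sorted (pvReady deps C) (fun x => x) false).isEmpty = true := by
          simp [(PySem.List.sorted_eq_nil_iff _ _ _).mpr hrd]
        rw [if_neg (by simp [h1]), if_pos h2]
        have hrdE : ((pvRem deps C).filter
            (fun s => PySem.Set.issubset ((pvD deps).getD s []) C)).isEmpty = true := by
          have : (pvRem deps C).filter
              (fun s => PySem.Set.issubset ((pvD deps).getD s []) C) = pvReady deps C := rfl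
          simp [this, hrd]
        rw [if_pos hrdE]
        have hlenpos : 0 < (pvRem deps C).length := List.length_pos_iff.mpr hrem
        have hlenle : (pvRem deps C).length ≤ (pvK deps).length := List.length_filter_le _ _
        have hlt : em < ((pvK deps).length : Int) := by omega
        -- the leftover positive-indegree keys are exactly A's remaining
        have hfilter : (pvK deps).filter (fun s => decide (0 < ind.getD s 0)) = pvRem deps C := by
          unfold pvRem
          apply List.filter_congr
          intro s hs
          rw [hind s hs]
          have hzi := pv_resid_zero_iff deps C s
          have hge : 0 ≤ pvResid deps C s := by unfold pvResid; positivity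
          cases hc : PySem.Set.contains C s with
          | true =>
            have h0 := hzi.mpr (hclosed s hs hc)
            simp [h0]
          | false =>
            have hsC : s ∉ C := by
              intro hm
              rw [(PySem.Set.contains_iff C s).mpr hm] at hc
              simp at hc
            have hmemrem : s ∈ pvRem deps C := List.mem_filter.mpr ⟨hs, by simpa using hsC⟩
            have hne : pvResid deps C s ≠ 0 := by
              intro h0
              have hsub := hzi.mp h0
              have hcontra : s ∈ pvReady deps C := List.mem_filter.mpr ⟨hmemrem, hsub⟩
              rw [hrd] at hcontra
              cases hcontra
            have hpos : (0 < pvResid deps C s) := by omega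
            simp [hpos]
        simp [pvFinish, hlt, hfilter]
      · -- a ready batch exists: both loops emit it and advance in lock step
        have hremnd : (pvRem deps C).Nodup := hnd.filter _
        have hrdnd : (pvReady deps C).Nodup := hremnd.filter _
        have hFperm : (PySem.List.sorted (pvReady deps C) (fun x => x) false).Perm
            (pvReady deps C) := PySem.List.sorted_perm _ _ _
        set F := PySem.List.sorted (pvReady deps C) (fun x => x) false with hFdef
        have hFnd : F.Nodup := hFperm.nodup_iff.mpr hrdnd
        have hFmem : ∀ x : Int, x ∈ F ↔ x ∈ pvReady deps C := by
          intro x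
          rw [hFdef]
          exact PySem.List.mem_sorted _ _ _ _
        have hFrem : ∀ u ∈ F, u ∈ pvRem deps C :=
          fun u hu => (List.mem_filter.mp ((hFmem u).mp hu)).1
        have hFK : ∀ u ∈ F, u ∈ pvK deps :=
          fun u hu => (List.mem_filter.mp (hFrem u hu)).1
        have hFnotC : ∀ u ∈ F, PySem.Set.contains C u = false := by
          intro u hu
          have h2 := (List.mem_filter.mp (hFrem u hu)).2
          cases hcc : PySem.Set.contains C u
          · rfl
          · rw [hcc] at h2
            cases h2
        have hFsub : ∀ u ∈ F, PySem.Set.issubset ((pvD deps).getD u []) C = true :=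
          fun u hu => (List.mem_filter.mp ((hFmem u).mp hu)).2
        -- count of decrements applied to a key v during this round
        have hcnt : ∀ v ∈ pvK deps,
            (F.flatMap (fun u => (pyB_build (pvD deps)).2.getD u [])).count v
              = ((pvDD deps v).filter (fun x => decide (x ∈ F))).length := by
          intro v hv
          rw [pv_count_round deps hnd F hFK v hv,
              pv_filter_mem_comm F (pvDD deps v) hFnd (PySem.Set.nodup_ofList _)]
        -- residual split: resid C = (hits in F) + resid after this round
        have hresid : ∀ v ∈ pvK deps, pvResid deps C v
            = (((pvDD deps v).filter (fun x => decide (x ∈ F))).length : Int)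
              + pvResid deps (PySem.Set.update C (pvReady deps C)) v := by
          intro v hv
          have hq := pv_length_filter_split (pvDD deps v)
            (fun x => !(PySem.Set.contains C x)) (fun x => decide (x ∈ F))
          have h1 : (pvDD deps v).filter
                (fun x => !(PySem.Set.contains C x) && decide (x ∈ F))
              = (pvDD deps v).filter (fun x => decide (x ∈ F)) := by
            apply List.filter_congr
            intro x _
            cases hxF : decide (x ∈ F) with
            | false => simp
            | true => rw [hFnotC x (of_decide_eq_true hxF)]; rfl
          have h2 : (pvDD deps v).filter
                (fun x => !(PySem.Set.contains C x) && !(decide (x ∈ F)))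
              = (pvDD deps v).filter
                (fun x => !(PySem.Set.contains (PySem.Set.update C (pvReady deps C)) x)) := by
            apply List.filter_congr
            intro x _
            rw [pv_contains_update]
            have hd : decide (x ∈ pvReady deps C) = decide (x ∈ F) := by
              simp [hFmem]
            rw [hd]
            cases PySem.Set.contains C x <;> cases decide (x ∈ F) <;> rfl
          rw [h1, h2] at hq
          unfold pvResid
          rw [hq]
          push_cast
          ring
        -- the remaining set splits likewise
        have hlen : (pvRem deps C).length
            = (pvRem deps (PySem.Set.update C (pvReady deps C))).length
              + (pvReady deps C).length := by
          have hq := pv_length_filter_split (pvK deps)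
            (fun s => !(PySem.Set.contains C s)) (fun s => !(decide (s ∈ pvReady deps C)))
          have h1 : (pvK deps).filter
                (fun s => !(PySem.Set.contains C s) && !(decide (s ∈ pvReady deps C)))
              = pvRem deps (PySem.Set.update C (pvReady deps C)) := by
            unfold pvRem
            apply List.filter_congr
            intro s _
            rw [pv_contains_update]
            cases PySem.Set.contains C s <;> cases decide (s ∈ pvReady deps C) <;> rfl
          have h2 : (pvK deps).filter
                (fun s => !(PySem.Set.contains C s) && !(!(decide (s ∈ pvReady deps C))))
              = (pvK deps).filter (fun s => decide (s ∈ pvReady deps C)) := by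
            apply List.filter_congr
            intro s _
            cases hs : decide (s ∈ pvReady deps C) with
            | false => simp
            | true =>
              have hmem : s ∈ pvRem deps C := (List.mem_filter.mp (of_decide_eq_true hs)).1
              have h3 := (List.mem_filter.mp hmem).2
              rw [h3]
              rfl
          have h3 : ((pvK deps).filter (fun s => decide (s ∈ pvReady deps C))).length
              = (pvReady deps C).length := by
            rw [pv_filter_mem_comm (pvK deps) (pvReady deps C) hnd hrdnd]
            have h4 : (pvReady deps C).filter (fun x => decide (x ∈ pvK deps))
                = pvReady deps C := by
              apply List.filter_eq_self.mpr
              intro x hx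
              have h5 : x ∈ pvK deps := (List.mem_filter.mp ((List.mem_filter.mp hx).1)).1
              simpa
            rw [h4]
          rw [h1, h2, h3] at hq
          exact hq
        have hrdpos : 0 < (pvReady deps C).length := List.length_pos_iff.mpr hrd
        have hFlen : F.length = (pvReady deps C).length := by
          rw [hFdef]
          exact PySem.List.length_sorted _ _ _
        -- invariant facts for the successor state
        have hind' : ∀ v ∈ pvK deps,
            (((F.flatMap (fun u => (pyB_build (pvD deps)).2.getD u [])).foldl
                pvStep (ind, [])).1).getD v 0
              = pvResid deps (PySem.Set.update C (pvReady deps C)) v := by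
          intro v hv
          rw [pv_round_fst, hind v hv, hcnt v hv, hresid v hv]
          ring
        have hnodup2 : ((F.flatMap (fun u => (pyB_build (pvD deps)).2.getD u [])).foldl
            pvStep (ind, [])).2.Nodup :=
          pv_round_nodup _ ind [] List.nodup_nil (by intro v hv; cases hv)
        have hmem2 : ∀ v : Int,
            v ∈ ((F.flatMap (fun u => (pyB_build (pvD deps)).2.getD u [])).foldl
                  pvStep (ind, [])).2
              ↔ v ∈ pvReady deps (PySem.Set.update C (pvReady deps C)) := by
          intro v
          rw [pv_round_mem]
          simp only [List.not_mem_nil, false_or]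
          by_cases hv : v ∈ pvK deps
          · rw [hind v hv, hcnt v hv]
            have hrv := hresid v hv
            have hge' : 0 ≤ pvResid deps (PySem.Set.update C (pvReady deps C)) v := by
              unfold pvResid; positivity
            constructor
            · rintro ⟨hp1, hp2⟩
              have hC'0 : pvResid deps (PySem.Set.update C (pvReady deps C)) v = 0 := by omega
              have hnC : PySem.Set.contains C v = false := by
                cases hcc : PySem.Set.contains C v with
                | false => rfl
                | true =>
                  exfalso
                  have h0 := (pv_resid_zero_iff deps C v).mpr (hclosed v hv hcc)
                  omega
              have hnrdy : v ∉ pvReady deps C := by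
                intro hmem
                have h0 := (pv_resid_zero_iff deps C v).mpr (List.mem_filter.mp hmem).2
                omega
              refine List.mem_filter.mpr ⟨List.mem_filter.mpr ⟨hv, ?_⟩,
                (pv_resid_zero_iff deps _ v).mp hC'0⟩
              rw [pv_contains_update, hnC]
              simp [hnrdy]
            · intro hmem
              have hsubC' := (List.mem_filter.mp hmem).2
              have hC'0 := (pv_resid_zero_iff deps _ v).mpr hsubC'
              have hniC' := (List.mem_filter.mp (List.mem_filter.mp hmem).1).2
              have hnC' : PySem.Set.contains (PySem.Set.update C (pvReady deps C)) v
                  = false := by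
                cases hcc : PySem.Set.contains (PySem.Set.update C (pvReady deps C)) v
                · rfl
                · rw [hcc] at hniC'
                  cases hniC'
              rw [pv_contains_update] at hnC'
              have hnC : PySem.Set.contains C v = false := (Bool.or_eq_false_iff.mp hnC').1
              have hnrdy : v ∉ pvReady deps C := by
                intro hm
                have h6 := (Bool.or_eq_false_iff.mp hnC').2
                simp [hm] at h6
              have hpos : 0 < pvResid deps C v := by
                by_cases h0 : pvResid deps C v = 0
                · exfalso
                  have hsub := (pv_resid_zero_iff deps C v).mp h0
                  have hvC : v ∉ C := by
                    intro hm
                    rw [(PySem.Set.contains_iff C v).mpr hm] at hnC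
                    cases hnC
                  exact hnrdy (List.mem_filter.mpr
                    ⟨List.mem_filter.mpr ⟨hv, by simpa using hvC⟩, hsub⟩)
                · have hge : 0 ≤ pvResid deps C v := by unfold pvResid; positivity
                  omega
              exact ⟨hpos, by omega⟩
          · constructor
            · rintro ⟨hp1, hp2⟩
              exfalso
              have hvL : v ∉ F.flatMap (fun u => (pyB_build (pvD deps)).2.getD u []) := by
                intro hL
                rcases List.mem_flatMap.mp hL with ⟨u, hu, hm⟩
                exact hv (pv_mem_succ_K deps u v hm)
              rw [List.count_eq_zero.mpr hvL] at hp2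
              simp at hp2
              omega
            · intro hmem
              exact absurd (List.mem_filter.mp (List.mem_filter.mp hmem).1).1 hv
        have hrdnd' : (pvReady deps (PySem.Set.update C (pvReady deps C))).Nodup :=
          (hnd.filter _).filter _
        have hfrontier' :
            PySem.List.sorted ((F.flatMap (fun u => (pyB_build (pvD deps)).2.getD u [])).foldl
                pvStep (ind, [])).2 (fun x => x) false
              = PySem.List.sorted (pvReady deps (PySem.Set.update C (pvReady deps C)))
                  (fun x => x) false := by
          rw [PySem.List.sorted_id_eq_sorted_id_iff_perm]
          exact (List.perm_ext_iff_of_nodup hnodup2 hrdnd').mpr hmem2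
        have hfuel' : (pvRem deps (PySem.Set.update C (pvReady deps C))).length < fuel := by
          omega
        have hem' : em + (F.length : Int)
            = ((pvK deps).length : Int)
              - ((pvRem deps (PySem.Set.update C (pvReady deps C))).length : Int) := by
          rw [hem, hFlen]
          push_cast
          omega
        have hclosed' : ∀ v ∈ pvK deps,
            PySem.Set.contains (PySem.Set.update C (pvReady deps C)) v = true →
              PySem.Set.issubset ((pvD deps).getD v [])
                (PySem.Set.update C (pvReady deps C)) = true := by
          intro v hv hc
          rw [pv_contains_update] at hc
          cases hor : PySem.Set.contains C v with
          | true => exact pv_issubset_update _ _ _ (hclosed v hv hor)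
          | false =>
            rw [hor] at hc
            simp only [Bool.false_or, decide_eq_true_eq] at hc
            exact pv_issubset_update _ _ _ ((List.mem_filter.mp hc).2)
        -- unfold one round of each loop
        rw [pyA_loop, pyB_loop]
        rw [if_neg (by simp [hrem])]
        have hAready : (pvRem deps C).filter
            (fun s => PySem.Set.issubset ((pvD deps).getD s []) C) = pvReady deps C := rfl
        rw [hAready]
        rw [if_neg (fun hh => hrd (List.isEmpty_iff.mp hh))]
        have hFne : F ≠ [] := by
          rw [hFdef]
          intro hh
          exact hrd ((PySem.List.sorted_eq_nil_iff _ _ _).mp hh)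
        rw [if_neg (fun hh => hFne (List.isEmpty_iff.mp hh)), ← hFdef]
        have hdiff : PySem.Set.diff (pvRem deps C) (pvReady deps C)
            = pvRem deps (PySem.Set.update C (pvReady deps C)) := by
          show (pvRem deps C).filter (fun x => !(PySem.Set.contains (pvReady deps C) x)) = _
          unfold pvRem
          rw [List.filter_filter]
          apply List.filter_congr
          intro x _
          rw [pv_contains_update, pv_contains_eq_decide (pvReady deps C) x]
          cases PySem.Set.contains C x <;> cases decide (x ∈ pvReady deps C) <;> rfl
        rw [hdiff, pv_round_eq]
        simp only [hfrontier']
        exact ih (PySem.Set.update C (pvReady deps C)) _ _ _ hfuel' hind' hclosed' hem'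

-- initial state: empty completed set, indegrees = sizes of the distinct dependency sets
lemma pv_rem0 (deps : List (Int × List Int)) : pvRem deps PySem.Set.empty = pvK deps := by
  unfold pvRem
  apply List.filter_eq_self.mpr
  intro x _
  simp [PySem.Set.empty]

lemma pv_ind0 (deps : List (Int × List Int)) (hnd : (pvK deps).Nodup) :
    ∀ v ∈ pvK deps,
      (pyB_build (pvD deps)).1.getD v 0 = pvResid deps PySem.Set.empty v := by
  intro v hv
  rw [pv_indeg_build deps hnd v hv]
  unfold pvResid
  have h : (pvDD deps v).filter (fun x => !(PySem.Set.contains PySem.Set.empty x))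
      = pvDD deps v := by
    apply List.filter_eq_self.mpr
    intro x _
    simp [PySem.Set.empty]
  rw [h]

lemma pv_front0 (deps : List (Int × List Int)) (hnd : (pvK deps).Nodup) :
    (pvK deps).filter (fun s => (pyB_build (pvD deps)).1.getD s 0 == 0)
      = pvReady deps PySem.Set.empty := by
  unfold pvReady
  rw [pv_rem0]
  apply List.filter_congr
  intro s hs
  rw [pv_ind0 deps hnd s hs, Bool.eq_iff_iff, beq_iff_eq]
  exact pv_resid_zero_iff deps PySem.Set.empty s

-- ===== VERDICT (by name: the statement is the Claim_ definition above) =====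
theorem topological_batches_py_spec : Claim_equal_topological_batches_py := by
  intro deps _ hpre
  unfold Spec_topological_batches_py
  have hnd : (pvK deps).Nodup := hpre
  rw [pv_alt_eq, pv_front0 deps hnd]
  have hfuel0 : (pvRem deps PySem.Set.empty).length < (pvK deps).length + 1 := by
    rw [pv_rem0]
    omega
  have hclosed0 : ∀ v ∈ pvK deps, PySem.Set.contains PySem.Set.empty v = true →
      PySem.Set.issubset ((pvD deps).getD v []) PySem.Set.empty = true := by
    intro v hv hc
    exact absurd hc (by simp [PySem.Set.empty])
  have hem0 : (0 : Int)
      = ((pvK deps).length : Int) - ((pvRem deps PySem.Set.empty).length : Int) := by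
    rw [pv_rem0]
    ring
  have H := pv_lockstep deps hnd ((pvK deps).length + 1) PySem.Set.empty
    (pyB_build (pvD deps)).1 0 [] hfuel0 (pv_ind0 deps hnd) hclosed0 hem0
  rw [pv_rem0] at H
  have hof : PySem.Set.ofList (pvK deps) = pvK deps :=
    PySem.Set.ofList_eq_self_of_nodup _ hnd
  show pyA_loop (pvD deps) ((PySem.Set.ofList (pvK deps)).length + 1)
      (PySem.Set.ofList (pvK deps)) PySem.Set.empty [] = _
  rw [hof]
  exact H
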